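-- pv_equiv track=rewrite | github.com/adviti/melange | app/soc/modules/gci/logic/helper/timeline.py | stopwatchPercentage
-- ===== SOURCE A (Python) =====
-- def stopwatchPercentage(complete_percentage):
--   """Computes the closest matching percentage for the static clock images.
--
--   Args:
--     complete_percentage: percentage of the time that is completed in the
--         program.
--   """
--   stopwatch_percentages = [25, 33, 50, 75, 100]
--
--   stopwatch_percentage = 0
--
--   for p in stopwatch_percentages:
--     # The 15 percent allowance is added so as to NOT make the clock
--     # look to be at 75% when the time is just 51%
--     if complete_percentage <= p + 15:
--       stopwatch_percentage = p
--       break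
--
--   return stopwatch_percentage
-- ===== SOURCE B (Python) =====
-- def stopwatchPercentage(complete_percentage):
--   boundaries = [40, 48, 65, 90, 115]
--   results = [25, 33, 50, 75, 100]
--   lo, hi = 0, 5
--   while lo < hi:
--     mid = (lo + hi) // 2
--     if boundaries[mid] < complete_percentage:
--       lo = mid + 1
--     else:
--       hi = mid
--   return results[lo] if lo < 5 else 0
-- ===== Notes on version B (the rewrite author's own statement) =====
-- stated objective: alternative
-- what changed: Replaces the break-on-first-match linear scan over bucket percentages with a binary search (hand-rolled bisect_left) over a precomputed boundary table, indexing into a parallel results table.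
import Mathlib
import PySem

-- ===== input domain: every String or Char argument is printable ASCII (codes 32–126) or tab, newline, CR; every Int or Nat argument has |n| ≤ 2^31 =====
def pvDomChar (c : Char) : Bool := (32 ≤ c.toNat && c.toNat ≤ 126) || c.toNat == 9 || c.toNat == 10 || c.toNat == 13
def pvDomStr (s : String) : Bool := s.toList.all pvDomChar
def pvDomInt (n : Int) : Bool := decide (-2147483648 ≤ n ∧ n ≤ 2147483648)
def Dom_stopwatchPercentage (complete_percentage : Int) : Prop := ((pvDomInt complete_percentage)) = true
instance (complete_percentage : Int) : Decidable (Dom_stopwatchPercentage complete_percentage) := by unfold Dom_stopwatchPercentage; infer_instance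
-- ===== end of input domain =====

-- B replaces A's break-on-first-match linear scan with a binary search (bisect_left) over a
-- precomputed boundary table plus a parallel results table (objective: alternative, same cost here).

-- ===== PORT A =====
-- A's for-loop with break: fold over the bucket list, keeping the first p with x ≤ p + 15.
def stopwatchA_loop (complete_percentage : Int) : List Int → Int
  | [] => 0
  | p :: ps => if complete_percentage ≤ p + 15 then p else stopwatchA_loop complete_percentage ps

def stopwatchPercentage (complete_percentage : Int) : Int :=
  stopwatchA_loop complete_percentage [25, 33, 50, 75, 100]

-- ===== PORT B =====
-- hand-rolled bisect_left: binary search for the first index with boundaries[i] >= x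
def bisectGo (bs : List Int) (x : Int) (lo hi : Nat) : Nat :=
  if h : lo < hi then
    let mid := (lo + hi) / 2
    if bs.getD mid 0 < x then bisectGo bs x (mid + 1) hi
    else bisectGo bs x lo mid
  else lo
termination_by hi - lo
decreasing_by
  · omega
  · omega

def stopwatchPercentage_alt (complete_percentage : Int) : Int :=
  let boundaries : List Int := [40, 48, 65, 90, 115]
  let results : List Int := [25, 33, 50, 75, 100]
  let lo := bisectGo boundaries complete_percentage 0 boundaries.length
  if lo < 5 then results.getD lo 0 else 0

-- ===== PRECONDITION & SPEC =====
def Spec_stopwatchPercentage (complete_percentage : Int) (out : Int) : Prop := out = stopwatchPercentage_alt complete_percentage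
instance (complete_percentage : Int) (out : Int) : Decidable (Spec_stopwatchPercentage complete_percentage out) := by unfold Spec_stopwatchPercentage; infer_instance

-- ===== CLAIM (what is proved, stated in full; the proofs are below) =====
def Claim_equal_stopwatchPercentage : Prop := ∀ (complete_percentage : Int), Dom_stopwatchPercentage complete_percentage → Spec_stopwatchPercentage complete_percentage (stopwatchPercentage complete_percentage)

-- ===== LEMMAS AND PROOFS =====

-- unfold one step of the binary search
theorem bisectGo_step (bs : List Int) (x : Int) (lo hi : Nat) (h : lo < hi) :
    bisectGo bs x lo hi =
      (if bs.getD ((lo + hi) / 2) 0 < x then bisectGo bs x ((lo + hi) / 2 + 1) hi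
       else bisectGo bs x lo ((lo + hi) / 2)) := by
  rw [bisectGo]; simp [h]

theorem bisectGo_done (bs : List Int) (x : Int) (lo hi : Nat) (h : ¬ lo < hi) :
    bisectGo bs x lo hi = lo := by
  rw [bisectGo]; simp [h]

-- ===== VERDICT (by name: the statement is the Claim_ definition above) =====
theorem stopwatchPercentage_spec : Claim_equal_stopwatchPercentage := by
  intro x _
  unfold Spec_stopwatchPercentage stopwatchPercentage stopwatchPercentage_alt
  simp only [stopwatchA_loop, List.length_cons, List.length_nil]
  by_cases h40 : x ≤ 40
  · have e : bisectGo [40,48,65,90,115] x 0 5 = 0 := by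
      rw [bisectGo_step _ _ _ _ (by omega)]
      norm_num [List.getD]
      rw [if_neg (by omega), bisectGo_step _ _ _ _ (by omega)]
      norm_num [List.getD]
      rw [if_neg (by omega), bisectGo_step _ _ _ _ (by omega)]
      norm_num [List.getD]
      rw [if_neg (by omega), bisectGo_done _ _ _ _ (by omega)]
    rw [e]; norm_num [List.getD]; omega
  · by_cases h48 : x ≤ 48
    · have e : bisectGo [40,48,65,90,115] x 0 5 = 1 := by
        rw [bisectGo_step _ _ _ _ (by omega)]
        norm_num [List.getD]
        rw [if_neg (by omega), bisectGo_step _ _ _ _ (by omega)]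
        norm_num [List.getD]
        rw [if_neg (by omega), bisectGo_step _ _ _ _ (by omega)]
        norm_num [List.getD]
        rw [if_pos (by omega), bisectGo_done _ _ _ _ (by omega)]
      rw [e]; norm_num [List.getD]; omega
    · by_cases h65 : x ≤ 65
      · have e : bisectGo [40,48,65,90,115] x 0 5 = 2 := by
          rw [bisectGo_step _ _ _ _ (by omega)]
          norm_num [List.getD]
          rw [if_neg (by omega), bisectGo_step _ _ _ _ (by omega)]
          norm_num [List.getD]
          rw [if_pos (by omega), bisectGo_done _ _ _ _ (by omega)]
        rw [e]; norm_num [List.getD]; omega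
      · by_cases h90 : x ≤ 90
        · have e : bisectGo [40,48,65,90,115] x 0 5 = 3 := by
            rw [bisectGo_step _ _ _ _ (by omega)]
            norm_num [List.getD]
            rw [if_pos (by omega), bisectGo_step _ _ _ _ (by omega)]
            norm_num [List.getD]
            rw [if_neg (by omega), bisectGo_step _ _ _ _ (by omega)]
            norm_num [List.getD]
            rw [if_neg (by omega), bisectGo_done _ _ _ _ (by omega)]
          rw [e]; norm_num [List.getD]; omega
        · by_cases h115 : x ≤ 115
          · have e : bisectGo [40,48,65,90,115] x 0 5 = 4 := by
              rw [bisectGo_step _ _ _ _ (by omega)]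
              norm_num [List.getD]
              rw [if_pos (by omega), bisectGo_step _ _ _ _ (by omega)]
              norm_num [List.getD]
              rw [if_neg (by omega), bisectGo_step _ _ _ _ (by omega)]
              norm_num [List.getD]
              rw [if_pos (by omega), bisectGo_done _ _ _ _ (by omega)]
            rw [e]; norm_num [List.getD]; omega
          · have e : bisectGo [40,48,65,90,115] x 0 5 = 5 := by
              rw [bisectGo_step _ _ _ _ (by omega)]
              norm_num [List.getD]
              rw [if_pos (by omega), bisectGo_step _ _ _ _ (by omega)]
              norm_num [List.getD]
              rw [if_pos (by omega), bisectGo_done _ _ _ _ (by omega)]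
            rw [e]; norm_num; omega
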